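-- pv_equiv track=rewrite | github.com/greenmonn/daily-coding | python/baekjun/15685_dragon_curve.py | solution
-- ===== SOURCE A (Python) =====
-- directions = {
--     0: (0, 1),
--     1: (-1, 0),
--     2: (0, -1),
--     3: (1, 0)
-- }
--
-- def draw_curve(grid, x, y, d, g):
--     dy, dx = directions[d]
--     start_vertex = (x, y)
--     vertices = [(x, y), (x+dx, y+dy)]
--     end_vertex = (x+dx, y+dy)
--     grid[y][x] = 1
--     grid[y+dy][x+dx] = 1
--
--     for i in range(g):
--         x, y = end_vertex
--         new_vertices = vertices[:]
--         for v in vertices: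
--             a, b = v
--             c, d = x+y-b, a-x+y
--             new_vertices.append((c, d))
--             grid[d][c] = 1
--
--         a, b = start_vertex
--         end_vertex = (x+y-b, a-x+y)
--         vertices = new_vertices
--
-- def solution(dragon_curves, N):
--     grid = [[0] * 101 for _ in range(101)]
--     # draw all dragon curves and mark vertices
--     for curve in dragon_curves:
--         x, y, d, g = curve
--
--         draw_curve(grid, x, y, d, g)
--
--     def has_all_vertices_from_curve(vertices):
--         for x, y in vertices:
--             if grid[y][x] != 1:
--                 return False
--         return True
--
--     # iterate all squares and check vertices
--     count = 0
--     for i in range(100):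
--         for j in range(100):
--             vertices = [(i, j), (i, j+1), (i+1, j), (i+1, j+1)]
--
--             if has_all_vertices_from_curve(vertices):
--                 count += 1
--
--     return count
-- ===== SOURCE B (Python) =====
-- directions = {
--     0: (0, 1),
--     1: (-1, 0),
--     2: (0, -1),
--     3: (1, 0)
-- }
--
-- def solution(dragon_curves, N):
--     grid = [[0] * 101 for _ in range(101)]
--     # walk each curve from its direction sequence instead of growing a vertex list
--     for x, y, d, g in dragon_curves:
--         dirs = [d]
--         for _ in range(g):
--             dirs = dirs + [(t + 1) % 4 for t in reversed(dirs)]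
--         grid[y][x] = 1
--         for t in dirs:
--             dy, dx = directions[t]
--             x, y = x + dx, y + dy
--             grid[y][x] = 1
--     # count unit squares whose four corners are all marked
--     count = 0
--     for i in range(100):
--         for j in range(100):
--             if grid[j][i] and grid[j][i + 1] and grid[j + 1][i] and grid[j + 1][i + 1]:
--                 count += 1
--     return count
-- ===== Notes on version B (the rewrite author's own statement) =====
-- stated objective: alternative
-- what changed: B generates each curve's turn-direction sequence (dirs + rotated reversed dirs per generation) and walks it one unit step at a time, instead of A's repeated rotate-and-append of a growing vertex list; the square-counting pass is unchanged.
-- outside the precondition, e.g. on solution([(0, 0, 5, 1)], 100): A raises KeyError, B raises KeyError; on solution([(200, 0, 0, 0)], 100): A raises IndexError, B raises IndexError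
import Mathlib
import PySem

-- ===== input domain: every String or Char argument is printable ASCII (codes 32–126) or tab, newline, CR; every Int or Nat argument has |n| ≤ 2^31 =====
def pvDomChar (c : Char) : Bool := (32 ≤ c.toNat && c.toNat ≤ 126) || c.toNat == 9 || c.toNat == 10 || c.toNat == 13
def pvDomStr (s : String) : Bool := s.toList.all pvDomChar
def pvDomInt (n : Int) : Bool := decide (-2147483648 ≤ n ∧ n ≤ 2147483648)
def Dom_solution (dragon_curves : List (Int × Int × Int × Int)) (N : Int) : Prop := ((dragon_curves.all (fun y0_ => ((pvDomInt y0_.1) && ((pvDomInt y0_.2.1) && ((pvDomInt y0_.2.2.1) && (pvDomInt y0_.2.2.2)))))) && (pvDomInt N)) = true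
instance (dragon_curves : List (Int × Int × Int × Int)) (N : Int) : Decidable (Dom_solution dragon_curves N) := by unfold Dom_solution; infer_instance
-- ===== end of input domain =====

-- B replaces A's grow-and-rotate vertex-list construction by generating each curve's
-- direction sequence (dirs ++ rotated reversed dirs per generation) and walking it step
-- by step; the counting pass is the same. Objective: alternative (not claimed faster).

-- ===== PORT A =====
-- shared Python-semantics helpers: grid[y][x] = 1 and grid[y][x] (negative indices wrap;
-- an out-of-range write would raise IndexError in Python and is excluded by Pre_)
def gridSet (G : List (List Int)) (y x : Int) : List (List Int) :=
  PySem.List.pySetD G y (PySem.List.pySetD ((PySem.List.pyGet? G y).getD []) x 1)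

def gridGet (G : List (List Int)) (y x : Int) : Int :=
  (PySem.List.pyGet? ((PySem.List.pyGet? G y).getD []) x).getD 0

-- directions[d] = (dy, dx); any other key raises KeyError in Python (excluded by Pre_)
def dirLookup (d : Int) : Int × Int :=
  if d = 0 then (0, 1) else if d = 1 then (-1, 0) else if d = 2 then (0, -1)
  else if d = 3 then (1, 0) else (0, 0)

-- A's rotation about e: (a, b) ↦ (x + y - b, a - x + y) with (x, y) = e
def rotP (e v : Int × Int) : Int × Int := (e.1 + e.2 - v.2, v.1 - e.1 + e.2)

-- the `for i in range(g)` loop of draw_curve, state (vertices, end_vertex, grid)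
def drawLoop (startv : Int × Int) :
    Nat → List (Int × Int) → Int × Int → List (List Int) → List (List Int)
  | 0, _, _, grid => grid
  | n + 1, verts, endv, grid =>
    let st := verts.foldl
      (fun st v => (st.1 ++ [rotP endv v], gridSet st.2 (rotP endv v).2 (rotP endv v).1))
      (verts, grid)
    drawLoop startv n st.1 (rotP endv startv) st.2

def drawCurve (grid : List (List Int)) (x y d g : Int) : List (List Int) :=
  let dydx := dirLookup d
  let grid1 := gridSet grid y x
  let grid2 := gridSet grid1 (y + dydx.1) (x + dydx.2)
  drawLoop (x, y) g.toNat [(x, y), (x + dydx.2, y + dydx.1)] (x + dydx.2, y + dydx.1) grid2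

def hasAll (grid : List (List Int)) : List (Int × Int) → Bool
  | [] => true
  | (x, y) :: rest => if gridGet grid y x ≠ 1 then false else hasAll grid rest

def countA (grid : List (List Int)) : Int :=
  (PySem.List.pyRange 0 100 1).foldl (fun count i =>
    (PySem.List.pyRange 0 100 1).foldl (fun count j =>
      if hasAll grid [(i, j), (i, j + 1), (i + 1, j), (i + 1, j + 1)] then count + 1
      else count) count) 0

def solution (dragon_curves : List (Int × Int × Int × Int)) (N : Int) : Int :=
  let grid := dragon_curves.foldl
    (fun grid c => drawCurve grid c.1 c.2.1 c.2.2.1 c.2.2.2)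
    (List.replicate 101 (List.replicate 101 (0 : Int)))
  countA grid

-- ===== PORT B =====
def genDirs : Nat → List Int → List Int
  | 0, dirs => dirs
  | n + 1, dirs => genDirs n (dirs ++ dirs.reverse.map (fun t => PySem.Int.mod (t + 1) 4))

def countB (grid : List (List Int)) : Int :=
  (PySem.List.pyRange 0 100 1).foldl (fun count i =>
    (PySem.List.pyRange 0 100 1).foldl (fun count j =>
      if gridGet grid j i == 1 && gridGet grid (j + 1) i == 1 &&
         gridGet grid j (i + 1) == 1 && gridGet grid (j + 1) (i + 1) == 1 then count + 1
      else count) count) 0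

def solution_alt (dragon_curves : List (Int × Int × Int × Int)) (N : Int) : Int :=
  let grid := dragon_curves.foldl (fun grid c =>
    let dirs := genDirs c.2.2.2.toNat [c.2.2.1]
    let st := dirs.foldl (fun (st : (Int × Int) × List (List Int)) t =>
        let dydx := dirLookup t
        ((st.1.1 + dydx.2, st.1.2 + dydx.1),
         gridSet st.2 (st.1.2 + dydx.1) (st.1.1 + dydx.2)))
      ((c.1, c.2.1), gridSet grid c.2.1 c.1)
    st.2) (List.replicate 101 (List.replicate 101 (0 : Int)))
  countB grid

-- ===== PRECONDITION & SPEC =====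
def inBox (p : Int × Int) : Bool := decide (-101 ≤ p.1 ∧ p.1 ≤ 100 ∧ -101 ≤ p.2 ∧ p.2 ≤ 100)

-- all vertices of one curve fit in the 101×101 grid (checked generation by generation,
-- stopping at the first vertex that escapes)
def fitsAux : Nat → List (Int × Int) → Int × Int → Int × Int → Bool
  | 0, pts, _, _ => pts.all inBox
  | n + 1, pts, s, e => pts.all inBox && fitsAux n (pts ++ pts.map (rotP e)) s (rotP e s)

def curveFits (x y d g : Int) : Bool :=
  let dydx := dirLookup d
  fitsAux g.toNat [(x, y), (x + dydx.2, y + dydx.1)] (x, y) (x + dydx.2, y + dydx.1)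

-- Pre_ excludes exactly the inputs where A raises: a direction key outside {0,1,2,3}
-- (KeyError) or a curve vertex outside index range [-101, 100] (IndexError on write).
def Pre_solution (dragon_curves : List (Int × Int × Int × Int)) (N : Int) : Prop :=
  ∀ c ∈ dragon_curves,
    (0 ≤ c.2.2.1 ∧ c.2.2.1 < 4) ∧ curveFits c.1 c.2.1 c.2.2.1 c.2.2.2 = true
instance (dragon_curves : List (Int × Int × Int × Int)) (N : Int) :
    Decidable (Pre_solution dragon_curves N) := by unfold Pre_solution; infer_instance

def pvWitness_solution : (List (Int × Int × Int × Int)) × Int := ([(50, 50, 0, 3), (40, 42, 2, 2)], 100)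

def Spec_solution (dragon_curves : List (Int × Int × Int × Int)) (N : Int) (out : Int) : Prop := out = solution_alt dragon_curves N
instance (dragon_curves : List (Int × Int × Int × Int)) (N : Int) (out : Int) : Decidable (Spec_solution dragon_curves N out) := by unfold Spec_solution; infer_instance

-- ===== CLAIM (what is proved, stated in full; the proofs are below) =====
def Claim_equal_solution : Prop := ∀ (dragon_curves : List (Int × Int × Int × Int)) (N : Int), Dom_solution dragon_curves N → Pre_solution dragon_curves N → Spec_solution dragon_curves N (solution dragon_curves N)

-- ===== LEMMAS AND PROOFS =====

-- abstract write list machinery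
def mark (G : List (List Int)) (p : Int × Int) : List (List Int) := gridSet G p.2 p.1
def markAll (G : List (List Int)) (l : List (Int × Int)) : List (List Int) := l.foldl mark G

def stepv (t : Int) : Int × Int := ((dirLookup t).2, (dirLookup t).1)

def ptsOf (p : Int × Int) : List Int → List (Int × Int)
  | [] => [p]
  | t :: l => p :: ptsOf (p.1 + (stepv t).1, p.2 + (stepv t).2) l

def pEnd (p : Int × Int) : List Int → Int × Int
  | [] => p
  | t :: l => pEnd (p.1 + (stepv t).1, p.2 + (stepv t).2) l

def vertsIter (s : Int × Int) : Nat → List (Int × Int) → Int × Int → List (Int × Int) × Int × Int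
  | 0, vs, e => (vs, e)
  | n + 1, vs, e => vertsIter s n (vs ++ vs.map (rotP e)) (rotP e s)

def writesA (c : Int × Int × Int × Int) : List (Int × Int) :=
  let dydx := dirLookup c.2.2.1
  (vertsIter (c.1, c.2.1) c.2.2.2.toNat
    [(c.1, c.2.1), (c.1 + dydx.2, c.2.1 + dydx.1)] (c.1 + dydx.2, c.2.1 + dydx.1)).1

def writesB (c : Int × Int × Int × Int) : List (Int × Int) :=
  ptsOf (c.1, c.2.1) (genDirs c.2.2.2.toNat [c.2.2.1])

-- geometry lemmas
theorem self_mem_ptsOf (p : Int × Int) (l : List Int) : p ∈ ptsOf p l := by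
  cases l <;> simp [ptsOf]

theorem pEnd_append (p : Int × Int) (l1 l2 : List Int) :
    pEnd p (l1 ++ l2) = pEnd (pEnd p l1) l2 := by
  induction l1 generalizing p with
  | nil => simp [pEnd]
  | cons t l ih => simp [pEnd, ih]

theorem ptsOf_snoc (p : Int × Int) (l : List Int) (t : Int) :
    ptsOf p (l ++ [t]) =
      ptsOf p l ++ [((pEnd p l).1 + (stepv t).1, (pEnd p l).2 + (stepv t).2)] := by
  induction l generalizing p with
  | nil => simp [ptsOf, pEnd]
  | cons u l ih => simp [ptsOf, pEnd, ih]

theorem mem_ptsOf_append (q p : Int × Int) (l1 l2 : List Int) :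
    q ∈ ptsOf p (l1 ++ l2) ↔ q ∈ ptsOf p l1 ∨ q ∈ ptsOf (pEnd p l1) l2 := by
  induction l1 generalizing p with
  | nil =>
    simp only [List.nil_append, ptsOf, pEnd, List.mem_singleton]
    constructor
    · intro h; exact Or.inr h
    · rintro (h | h)
      · rw [h]; exact self_mem_ptsOf _ _
      · exact h
  | cons t l ih => simp [ptsOf, pEnd, ih, or_assoc]

theorem rotP_self (e : Int × Int) : rotP e e = e := by
  simp [rotP]

theorem step_rot (t : Int) (h0 : 0 ≤ t) (h4 : t < 4) :
    stepv (PySem.Int.mod (t + 1) 4) = ((stepv t).2, -(stepv t).1) := by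
  interval_cases t <;> decide

-- walking the rotated reversed direction list from the rotated end traces the
-- rotated reversed point list
theorem rot_walk (l : List Int) (p e : Int × Int) (hl : ∀ t ∈ l, 0 ≤ t ∧ t < 4) :
    ptsOf (rotP e (pEnd p l)) (l.reverse.map (fun t => PySem.Int.mod (t + 1) 4)) =
      ((ptsOf p l).reverse).map (rotP e) ∧
    pEnd (rotP e (pEnd p l)) (l.reverse.map (fun t => PySem.Int.mod (t + 1) 4)) =
      rotP e p := by
  induction l generalizing p with
  | nil => simp [ptsOf, pEnd]
  | cons t l ih =>
    have ht := hl t (List.mem_cons_self ..)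
    have hl' : ∀ u ∈ l, 0 ≤ u ∧ u < 4 := fun u hu => hl u (List.mem_cons_of_mem _ hu)
    obtain ⟨ih1, ih2⟩ := ih (p.1 + (stepv t).1, p.2 + (stepv t).2) hl'
    have hkey :
        ((rotP e (p.1 + (stepv t).1, p.2 + (stepv t).2)).1 +
            (stepv (PySem.Int.mod (t + 1) 4)).1,
          (rotP e (p.1 + (stepv t).1, p.2 + (stepv t).2)).2 +
            (stepv (PySem.Int.mod (t + 1) 4)).2) = rotP e p := by
      rw [step_rot t ht.1 ht.2]
      simp only [rotP, Prod.mk.injEq]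
      constructor <;> ring
    rw [show pEnd p (t :: l) = pEnd (p.1 + (stepv t).1, p.2 + (stepv t).2) l from rfl,
      show ptsOf p (t :: l) = p :: ptsOf (p.1 + (stepv t).1, p.2 + (stepv t).2) l from rfl,
      List.reverse_cons, List.map_append, List.reverse_cons, List.map_append,
      List.map_singleton, List.map_singleton, ptsOf_snoc, ih1, ih2, pEnd_append, ih2, hkey]
    constructor
    · rfl
    · rw [show ∀ (q : Int × Int) (u : Int), pEnd q [u] = (q.1 + (stepv u).1, q.2 + (stepv u).2)
        from fun q u => rfl]
      exact hkey

-- main invariant: A's vertex iteration and B's direction doubling generate the same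
-- point set (and the same end vertex)
theorem verts_eq_pts (n : Nat) (dirs : List Int) (vs : List (Int × Int)) (e s : Int × Int)
    (hvs : ∀ q, q ∈ vs ↔ q ∈ ptsOf s dirs) (he : e = pEnd s dirs)
    (hdirs : ∀ t ∈ dirs, 0 ≤ t ∧ t < 4) :
    ∀ q, q ∈ (vertsIter s n vs e).1 ↔ q ∈ ptsOf s (genDirs n dirs) := by
  induction n generalizing dirs vs e with
  | zero => intro q; simpa [vertsIter, genDirs] using hvs q
  | succ n ih =>
    obtain ⟨hr1, hr2⟩ := rot_walk dirs s e hdirs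
    rw [← he, rotP_self] at hr1 hr2
    have hvs' : ∀ q, q ∈ vs ++ vs.map (rotP e) ↔
        q ∈ ptsOf s (dirs ++ dirs.reverse.map (fun t => PySem.Int.mod (t + 1) 4)) := by
      intro r
      rw [mem_ptsOf_append, ← he, hr1, List.mem_append]
      simp only [List.mem_map, List.mem_reverse, hvs]
    have he' : rotP e s = pEnd s (dirs ++ dirs.reverse.map (fun t => PySem.Int.mod (t + 1) 4)) := by
      rw [pEnd_append, ← he, hr2]
    have hd' : ∀ t ∈ dirs ++ dirs.reverse.map (fun t => PySem.Int.mod (t + 1) 4),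
        0 ≤ t ∧ t < 4 := by
      intro t htm
      rcases List.mem_append.1 htm with h | h
      · exact hdirs t h
      · obtain ⟨u, hu, rfl⟩ := List.mem_map.1 h
        exact ⟨PySem.Int.mod_nonneg _ (by norm_num), PySem.Int.mod_lt _ (by norm_num)⟩
    intro q
    simp only [vertsIter, genDirs]
    exact ih _ _ _ hvs' he' hd' q

-- grid characterization
def hitIdx (i j : Int) : Bool :=
  (PySem.List.pyIdx? 101 i).isSome && (PySem.List.pyIdx? 101 i == PySem.List.pyIdx? 101 j)

def hit (y x : Int) (p : Int × Int) : Bool := hitIdx p.2 y && hitIdx p.1 x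

def shaped (G : List (List Int)) : Prop := G.length = 101 ∧ ∀ row ∈ G, row.length = 101

theorem pyIdx?_lt {n : Nat} {i : Int} {k : Nat} (h : PySem.List.pyIdx? n i = some k) :
    k < n := by
  unfold PySem.List.pyIdx? at h
  split_ifs at h <;> simp_all <;> omega

theorem mark_shaped {G : List (List Int)} (h : shaped G) (p : Int × Int) :
    shaped (mark G p) := by
  obtain ⟨hlen, hrows⟩ := h
  unfold mark gridSet PySem.List.pySetD PySem.List.pySet?
  cases hk : PySem.List.pyIdx? G.length p.2 with
  | none => simpa [hk] using ⟨hlen, hrows⟩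
  | some k =>
    have hklt : k < G.length := pyIdx?_lt hk
    have hrow : (PySem.List.pyGet? G p.2).getD [] = G[k] := by
      simp [PySem.List.pyGet?, hk, List.getElem?_eq_getElem hklt]
    simp only [hk, Option.map_some, Option.getD_some]
    constructor
    · simpa using hlen
    · intro row hr
      rcases List.mem_or_eq_of_mem_set hr with h1 | h1
      · exact hrows row h1
      · rw [h1, hrow]
        have hg := hrows _ (List.getElem_mem hklt)
        cases hc : PySem.List.pyIdx? (G[k]).length p.1 <;> simp [hc, hg]

theorem gridGet_mark {G : List (List Int)} (h : shaped G) (p : Int × Int) (y x : Int) :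
    gridGet (mark G p) y x = if hit y x p then 1 else gridGet G y x := by
  obtain ⟨hlen, hrows⟩ := h
  unfold mark gridSet gridGet hit hitIdx
  cases hk : PySem.List.pyIdx? 101 p.2 with
  | none =>
    have hk' : PySem.List.pyIdx? G.length p.2 = none := by rw [hlen]; exact hk
    simp [PySem.List.pySetD, PySem.List.pySet?, hk, hk']
  | some k =>
    have hklt : k < 101 := pyIdx?_lt hk
    have hk' : PySem.List.pyIdx? G.length p.2 = some k := by rw [hlen]; exact hk
    have hrow : (PySem.List.pyGet? G p.2).getD [] = G[k]'(by omega) := by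
      simp [PySem.List.pyGet?, hk', List.getElem?_eq_getElem (by omega : k < G.length)]
    rw [show PySem.List.pySetD G p.2
          (PySem.List.pySetD ((PySem.List.pyGet? G p.2).getD []) p.1 1) =
        G.set k (PySem.List.pySetD (G[k]'(by omega)) p.1 1) from by
      simp [PySem.List.pySetD, PySem.List.pySet?, hk', hrow]]
    have hrl : (G[k]'(by omega)).length = 101 := hrows _ (List.getElem_mem _)
    have hkG : k < G.length := by omega
    cases hy : PySem.List.pyIdx? 101 y with
    | none =>
      have h1 : PySem.List.pyIdx? (G.set k (PySem.List.pySetD (G[k]'(by omega)) p.1 1)).length y = none := by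
        rw [List.length_set, hlen]; exact hy
      have h2 : PySem.List.pyIdx? G.length y = none := by rw [hlen]; exact hy
      simp [PySem.List.pyGet?, h1, h2, hy]
    | some r =>
      have hrlt : r < 101 := pyIdx?_lt hy
      have h1 : PySem.List.pyIdx? (G.set k (PySem.List.pySetD (G[k]'(by omega)) p.1 1)).length y = some r := by
        rw [List.length_set, hlen]; exact hy
      have h2 : PySem.List.pyIdx? G.length y = some r := by rw [hlen]; exact hy
      by_cases hkr : k = r
      · subst hkr
        cases hc : PySem.List.pyIdx? 101 p.1 with
        | none =>
          have hc' : PySem.List.pyIdx? (G[k]'(by omega)).length p.1 = none := by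
            rw [hrl]; exact hc
          simp [PySem.List.pyGet?, h1, h2, hy, hc, PySem.List.pySetD, PySem.List.pySet?, hc',
            List.getElem?_set_self, List.getElem?_eq_getElem (by omega : k < G.length)]
        | some c =>
          have hclt : c < 101 := pyIdx?_lt hc
          have hc' : PySem.List.pyIdx? (G[k]'(by omega)).length p.1 = some c := by
            rw [hrl]; exact hc
          have hset : PySem.List.pySetD (G[k]'(by omega)) p.1 1 = (G[k]'(by omega)).set c 1 := by
            simp [PySem.List.pySetD, PySem.List.pySet?, hc']
          cases hx : PySem.List.pyIdx? 101 x with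
          | none =>
            simp [PySem.List.pyGet?, h1, h2, hy, hc, hx, hset, hkG,
              List.getElem?_set_self, List.getElem?_eq_getElem (by omega : k < G.length),
              (by rw [List.length_set, hrl]; exact hx :
                PySem.List.pyIdx? ((G[k]'(by omega)).set c 1).length x = none),
              (by rw [hrl]; exact hx : PySem.List.pyIdx? (G[k]'(by omega)).length x = none)]
          | some c' =>
            have hc'lt : c' < 101 := pyIdx?_lt hx
            have hx1 : PySem.List.pyIdx? ((G[k]'(by omega)).set c 1).length x = some c' := by
              rw [List.length_set, hrl]; exact hx
            have hx2 : PySem.List.pyIdx? (G[k]'(by omega)).length x = some c' := by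
              rw [hrl]; exact hx
            by_cases hcc : c = c'
            · subst hcc
              simp [PySem.List.pyGet?, h1, h2, hy, hc, hx, hset, hx1, hx2,
                List.getElem?_set_self, List.getElem?_eq_getElem (by omega : k < G.length),
                List.getElem?_set_self' , (by omega : c < (G[k]'(by omega)).length)]
            · simp [PySem.List.pyGet?, h1, h2, hy, hc, hx, hset, hx1, hx2, hcc, hkG,
                List.getElem?_set_self, List.getElem?_eq_getElem (by omega : k < G.length),
                List.getElem?_set_ne hcc]
      · have hne : (G.set k (PySem.List.pySetD (G[k]'(by omega)) p.1 1))[r]? = G[r]? := by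
          rw [List.getElem?_set_ne hkr]
        simp [PySem.List.pyGet?, h1, h2, hy, hne, hkr]

theorem markAll_append (G : List (List Int)) (l1 l2 : List (Int × Int)) :
    markAll G (l1 ++ l2) = markAll (markAll G l1) l2 := List.foldl_append ..

theorem gridGet_markAll {G : List (List Int)} (h : shaped G) (l : List (Int × Int)) (y x : Int) :
    gridGet (markAll G l) y x = if l.any (hit y x) then 1 else gridGet G y x := by
  induction l generalizing G with
  | nil => simp [markAll]
  | cons p l ih =>
    have h1 := mark_shaped h p
    simp only [markAll, List.foldl_cons, List.any_cons]
    rw [show (l.foldl mark (mark G p)) = markAll (mark G p) l from rfl, ih h1,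
      gridGet_mark h]
    by_cases hp : hit y x p <;> by_cases hl : l.any (hit y x) <;> simp [hp, hl]

-- the grid effect of A's draw_curve is marking writesA
theorem innerFold (e : Int × Int) (verts acc : List (Int × Int)) (H : List (List Int)) :
    verts.foldl
      (fun st v => (st.1 ++ [rotP e v], gridSet st.2 (rotP e v).2 (rotP e v).1)) (acc, H) =
    (acc ++ verts.map (rotP e), markAll H (verts.map (rotP e))) := by
  induction verts generalizing acc H with
  | nil => simp [markAll]
  | cons v l ih => simp [List.foldl_cons, ih, markAll, mark]

theorem drawLoop_markAll (s : Int × Int) (n : Nat) (vs : List (Int × Int)) (e : Int × Int)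
    (G : List (List Int)) :
    drawLoop s n vs e (markAll G vs) = markAll G (vertsIter s n vs e).1 := by
  induction n generalizing vs e G with
  | zero => rfl
  | succ n ih =>
    simp only [drawLoop, innerFold, vertsIter]
    rw [← markAll_append, ih]

theorem drawCurve_markAll (G : List (List Int)) (c : Int × Int × Int × Int) :
    drawCurve G c.1 c.2.1 c.2.2.1 c.2.2.2 = markAll G (writesA c) := by
  unfold drawCurve writesA
  exact drawLoop_markAll ..

-- the grid effect of B's walk is marking writesB
theorem walk_markAll (dirs : List Int) (p : Int × Int) (G : List (List Int)) :
    dirs.foldl (fun (st : (Int × Int) × List (List Int)) t =>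
        let dydx := dirLookup t
        ((st.1.1 + dydx.2, st.1.2 + dydx.1),
         gridSet st.2 (st.1.2 + dydx.1) (st.1.1 + dydx.2)))
      (p, gridSet G p.2 p.1) = (pEnd p dirs, markAll G (ptsOf p dirs)) := by
  induction dirs generalizing p G with
  | nil => simp [pEnd, ptsOf, markAll, mark]
  | cons t l ih => simp [pEnd, ptsOf, markAll, mark, stepv, List.foldl_cons, ih]

-- fold over all curves = markAll of the concatenated write lists
theorem foldA_markAll (curves : List (Int × Int × Int × Int)) (G : List (List Int)) :
    curves.foldl (fun grid c => drawCurve grid c.1 c.2.1 c.2.2.1 c.2.2.2) G =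
      markAll G (curves.flatMap writesA) := by
  induction curves generalizing G with
  | nil => simp [markAll]
  | cons c cs ih =>
    simp only [List.foldl_cons, List.flatMap_cons]
    rw [drawCurve_markAll G c, ih, markAll_append]

theorem foldB_markAll (curves : List (Int × Int × Int × Int)) (G : List (List Int)) :
    curves.foldl (fun grid c =>
      (( genDirs c.2.2.2.toNat [c.2.2.1]).foldl (fun (st : (Int × Int) × List (List Int)) t =>
          let dydx := dirLookup t
          ((st.1.1 + dydx.2, st.1.2 + dydx.1),
           gridSet st.2 (st.1.2 + dydx.1) (st.1.1 + dydx.2)))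
        ((c.1, c.2.1), gridSet grid c.2.1 c.1)).2) G =
      markAll G (curves.flatMap writesB) := by
  induction curves generalizing G with
  | nil => simp [markAll]
  | cons c cs ih =>
    simp only [List.foldl_cons, List.flatMap_cons]
    rw [walk_markAll]
    dsimp only
    rw [ih, ← markAll_append]
    rfl

-- counting depends on the grid only through gridGet
theorem countA_eq_countB {GA GB : List (List Int)}
    (h : ∀ y x, gridGet GA y x = gridGet GB y x) : countA GA = countB GB := by
  have h4 : ∀ i j : Int, hasAll GA [(i, j), (i, j + 1), (i + 1, j), (i + 1, j + 1)] =
      (gridGet GB j i == 1 && gridGet GB (j + 1) i == 1 &&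
       gridGet GB j (i + 1) == 1 && gridGet GB (j + 1) (i + 1) == 1) := by
    intro i j
    simp only [hasAll, h]
    by_cases h1 : gridGet GB j i = 1 <;> by_cases h2 : gridGet GB (j + 1) i = 1 <;>
      by_cases h3 : gridGet GB j (i + 1) = 1 <;>
      by_cases h5 : gridGet GB (j + 1) (i + 1) = 1 <;> simp [h1, h2, h3, h5]
  simp only [countA, countB, h4]

-- ===== VERDICT (by name: the statement is the Claim_ definition above) =====
theorem shaped_init : shaped (List.replicate 101 (List.replicate 101 (0 : Int))) := by
  constructor
  · simp
  · intro row hr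
    rw [List.eq_of_mem_replicate hr]
    simp

theorem writes_mem_iff (c : Int × Int × Int × Int) (hd0 : 0 ≤ c.2.2.1) (hd4 : c.2.2.1 < 4) :
    ∀ q, q ∈ writesA c ↔ q ∈ writesB c := by
  intro q
  unfold writesA writesB
  apply verts_eq_pts
  · intro r; simp [ptsOf, stepv]
  · simp [pEnd, stepv]
  · intro t ht
    rw [List.mem_singleton] at ht
    exact ht ▸ ⟨hd0, hd4⟩

theorem solution_spec : Claim_equal_solution := by
  intro curves N _hdom hpre
  unfold Spec_solution solution solution_alt
  rw [foldA_markAll, foldB_markAll]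
  apply countA_eq_countB
  intro y x
  rw [gridGet_markAll shaped_init, gridGet_markAll shaped_init]
  have hmem : ∀ q, q ∈ curves.flatMap writesA ↔ q ∈ curves.flatMap writesB := by
    intro q
    simp only [List.mem_flatMap]
    constructor
    · rintro ⟨c, hc, hq⟩
      exact ⟨c, hc, (writes_mem_iff c (hpre c hc).1.1 (hpre c hc).1.2 q).1 hq⟩
    · rintro ⟨c, hc, hq⟩
      exact ⟨c, hc, (writes_mem_iff c (hpre c hc).1.1 (hpre c hc).1.2 q).2 hq⟩
  have hany : (curves.flatMap writesA).any (hit y x) =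
      (curves.flatMap writesB).any (hit y x) := by
    rw [Bool.eq_iff_iff, List.any_eq_true, List.any_eq_true]
    constructor
    · rintro ⟨q, hq, hh⟩; exact ⟨q, (hmem q).1 hq, hh⟩
    · rintro ⟨q, hq, hh⟩; exact ⟨q, (hmem q).2 hq, hh⟩
  rw [hany]
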